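-- pv_equiv track=rewrite | github.com/dlwhd990/BOJ-2022 | BOJ/[23562]ㄷ만들기.py | makeDigut
-- ===== SOURCE A (Python) =====
-- def makeDigut(k):
--     digut = [["."]*(k*3) for _ in range(k*3)]
--
--     for i in range(k):
--         for j in range(k*3):
--             digut[i][j] = "#"
--
--     for i in range(k):
--         for j in range(k):
--             digut[k+i][j] = "#"
--
--     for i in range(k):
--         for j in range(k*3):
--             digut[k*2+i][j] = "#"
--
--     return digut
-- ===== SOURCE B (Python) =====
-- def makeDigut(k):
--     n = k * 3
--     grid = []
--     for r in range(n):
--         if r < k or r >= 2 * k: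
--             grid.append(["#"] * n)
--         else:
--             grid.append(["#"] * k + ["."] * (k * 2))
--     return grid
-- ===== Notes on version B (the rewrite author's own statement) =====
-- stated objective: simpler
-- what changed: Builds each row directly in a single pass classifying rows by index (full '#' row for the top and bottom thirds, '#'*k + '.'*2k for the middle third) instead of allocating a full '.' grid and overwriting three regions with nested double loops.
import Mathlib
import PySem

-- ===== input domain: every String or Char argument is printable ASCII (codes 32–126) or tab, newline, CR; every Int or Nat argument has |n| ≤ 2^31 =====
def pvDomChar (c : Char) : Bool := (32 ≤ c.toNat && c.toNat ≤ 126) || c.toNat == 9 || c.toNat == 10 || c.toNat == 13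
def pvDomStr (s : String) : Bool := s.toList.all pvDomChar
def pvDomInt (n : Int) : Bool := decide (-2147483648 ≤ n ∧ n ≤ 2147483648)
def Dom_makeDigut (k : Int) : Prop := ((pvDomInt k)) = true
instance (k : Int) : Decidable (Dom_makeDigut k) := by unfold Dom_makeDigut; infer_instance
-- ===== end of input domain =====

-- B builds each row directly by classifying its index instead of overwriting a '.' grid; objective: simpler.

-- ===== PORT A =====
def makeDigut (k : Int) : List (List String) :=
  let digut := (PySem.List.pyRange 0 (k*3) 1).map (fun _ => PySem.List.pyRepeat ["."] (k*3))
  let digut := (PySem.List.pyRange 0 k 1).foldl (fun g i =>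
      (PySem.List.pyRange 0 (k*3) 1).foldl (fun g j =>
        PySem.List.pySetD g i (PySem.List.pySetD (PySem.List.pyGetD g i []) j "#")) g) digut
  let digut := (PySem.List.pyRange 0 k 1).foldl (fun g i =>
      (PySem.List.pyRange 0 k 1).foldl (fun g j =>
        PySem.List.pySetD g (k+i) (PySem.List.pySetD (PySem.List.pyGetD g (k+i) []) j "#")) g) digut
  let digut := (PySem.List.pyRange 0 k 1).foldl (fun g i =>
      (PySem.List.pyRange 0 (k*3) 1).foldl (fun g j =>
        PySem.List.pySetD g (k*2+i) (PySem.List.pySetD (PySem.List.pyGetD g (k*2+i) []) j "#")) g) digut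
  digut

-- ===== PORT B =====
def makeDigut_alt (k : Int) : List (List String) :=
  (PySem.List.pyRange 0 (k*3) 1).foldl (fun grid r =>
    grid ++ [if r < k || 2*k ≤ r then PySem.List.pyRepeat ["#"] (k*3)
             else PySem.List.pyRepeat ["#"] k ++ PySem.List.pyRepeat ["."] (k*2)]) []

-- ===== PRECONDITION & SPEC =====
def Spec_makeDigut (k : Int) (out : List (List String)) : Prop := out = makeDigut_alt k
instance (k : Int) (out : List (List String)) : Decidable (Spec_makeDigut k out) := by unfold Spec_makeDigut; infer_instance

-- ===== CLAIM (what is proved, stated in full; the proofs are below) =====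
def Claim_equal_makeDigut : Prop := ∀ (k : Int), Dom_makeDigut k → Spec_makeDigut k (makeDigut k)

-- ===== LEMMAS AND PROOFS =====

-- the result of Python's inner row loop "for j in range(m): row[j] = '#'"
def fillRow (m : Nat) (r : List String) : List String :=
  (PySem.List.pyRange 0 (m : Int) 1).foldl (fun r j => PySem.List.pySetD r j "#") r

theorem set_getD_self (g : List (List String)) (t : Nat) :
    g.set t (g.getD t []) = g := by
  apply List.ext_getElem (by simp)
  intro i h1 h2
  rcases eq_or_ne i t with rfl | hne
  · simp [List.getD, List.getElem?_eq_getElem (by simpa using h2)]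
  · simp
    rw [List.getElem_set_ne (by omega)]

theorem fillRow_succ (m : Nat) (r : List String) :
    fillRow (m+1) r = (fillRow m r).set m "#" := by
  unfold fillRow
  rw [show ((m+1 : Nat) : Int) = (m : Int) + 1 by push_cast; ring,
      PySem.List.pyRange_one_succ_right (by positivity)]
  simp

theorem inner_fold (m : Nat) (g : List (List String)) (i : Int) (hi : 0 ≤ i) :
    (PySem.List.pyRange 0 (m : Int) 1).foldl
      (fun g j => PySem.List.pySetD g i (PySem.List.pySetD (PySem.List.pyGetD g i []) j "#")) g
    = PySem.List.pySetD g i (fillRow m (PySem.List.pyGetD g i [])) := by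
  induction m with
  | zero =>
      unfold fillRow
      rw [show ((0:Nat):Int) = 0 from rfl, PySem.List.pyRange_one_eq_nil le_rfl]
      simp only [List.foldl_nil]
      rw [PySem.List.pySetD_of_nonneg _ _ hi, PySem.List.pyGetD_of_nonneg _ _ hi,
          set_getD_self]
  | succ m ih =>
      rw [show ((m+1 : Nat) : Int) = (m : Int) + 1 by push_cast; ring,
          PySem.List.pyRange_one_succ_right (by positivity), List.foldl_append]
      rw [ih, fillRow_succ]
      simp only [List.foldl_cons, List.foldl_nil]
      rw [PySem.List.pySetD_of_nonneg _ _ hi, PySem.List.pySetD_of_nonneg _ _ hi,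
          PySem.List.pySetD_of_nonneg _ _ hi, PySem.List.pyGetD_of_nonneg _ _ hi,
          PySem.List.pyGetD_of_nonneg _ _ hi]
      set t := i.toNat with ht
      by_cases h : t < g.length
      · have : (g.set t (fillRow m (g.getD t []))).getD t [] = fillRow m (g.getD t []) := by
          simp [List.getD, h]
        rw [this, List.set_set]
        simp [PySem.List.pySetD_natCast]
      · have hle : g.length ≤ t := by omega
        simp [List.set_eq_of_length_le, hle]

theorem blockfill (f : List String → List String) (idx : Int → Int) (cnt : Nat)
    (pre post : List (List String)) (row : List String)
    (hidx : ∀ i, idx i = (pre.length : Int) + i) :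
    (PySem.List.pyRange 0 (cnt : Int) 1).foldl
      (fun g i => PySem.List.pySetD g (idx i) (f (PySem.List.pyGetD g (idx i) [])))
      (pre ++ (List.replicate cnt row ++ post))
    = pre ++ (List.replicate cnt (f row) ++ post) := by
  induction cnt generalizing post with
  | zero => simp
  | succ c ih =>
      rw [show ((c+1 : Nat) : Int) = (c : Int) + 1 by push_cast; ring,
          PySem.List.pyRange_one_succ_right (by positivity), List.foldl_append,
          List.replicate_succ' (n := c) (a := row), List.append_assoc (List.replicate c row)]
      rw [ih (post := [row] ++ post)]
      simp only [List.foldl_cons, List.foldl_nil]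
      have hlen : ((idx (c : Int))).toNat = pre.length + c := by
        rw [hidx]; omega
      have hnn : 0 ≤ idx (c : Int) := by rw [hidx]; positivity
      rw [PySem.List.pySetD_of_nonneg _ _ hnn, PySem.List.pyGetD_of_nonneg _ _ hnn, hlen]
      have hget : (pre ++ (List.replicate c (f row) ++ ([row] ++ post))).getD (pre.length + c) [] = row := by
        rw [List.getD, List.getElem?_append_right (by simp)]
        simp
      rw [hget]
      have hset : (pre ++ (List.replicate c (f row) ++ ([row] ++ post))).set (pre.length + c) (f row)
          = pre ++ (List.replicate (c+1) (f row) ++ post) := by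
        rw [List.set_append_right _ _ (by simp), List.set_append_right _ _ (by simp)]
        simp [List.replicate_succ']
      rw [hset]

theorem fillRow_eq (m : Nat) (row : List String) (h : m ≤ row.length) :
    fillRow m row = List.replicate m "#" ++ row.drop m := by
  induction m with
  | zero => simp [fillRow]
  | succ c ih =>
      rw [fillRow_succ, ih (by omega),
          List.set_append_right _ _ (by simp)]
      simp only [List.length_replicate, Nat.sub_self]
      rw [List.drop_eq_getElem_cons (show c < row.length by omega), List.set_cons_zero]
      simp [List.replicate_succ']

-- A's value for k = n ≥ 0, in closed form
theorem makeDigut_nat (n : Nat) :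
    makeDigut (n : Int) =
      List.replicate n (List.replicate (3*n) "#")
      ++ (List.replicate n (List.replicate n "#" ++ List.replicate (2*n) ".")
      ++ List.replicate n (List.replicate (3*n) "#")) := by
  unfold makeDigut
  simp only
  have h3 : ((n : Int) * 3) = ((3*n : Nat) : Int) := by push_cast; ring
  have hinit : (PySem.List.pyRange 0 ((n : Int)*3) 1).map (fun _ => PySem.List.pyRepeat ["."] ((n : Int)*3))
      = List.replicate (3*n) (List.replicate (3*n) ".") := by
    rw [List.map_const']
    rw [PySem.List.pyRepeat_singleton, h3]
    simp [PySem.List.length_pyRange_one]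
    omega
  rw [hinit]
  -- stage 1
  have s1 : ∀ g : List (List String),
      (PySem.List.pyRange 0 (n : Int) 1).foldl (fun g i =>
        (PySem.List.pyRange 0 ((n:Int)*3) 1).foldl (fun g j =>
          PySem.List.pySetD g i (PySem.List.pySetD (PySem.List.pyGetD g i []) j "#")) g) g
      = (PySem.List.pyRange 0 (n : Int) 1).foldl (fun g i =>
          PySem.List.pySetD g i (fillRow (3*n) (PySem.List.pyGetD g i []))) g := by
    intro g
    apply PySem.List.foldl_congr_mem
    intro acc x hx
    have hx0 : 0 ≤ x := (PySem.List.mem_pyRange_one.mp hx).1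
    rw [h3, inner_fold _ _ _ hx0]
  rw [s1]
  have hsplit : List.replicate (3*n) (List.replicate (3*n) ".")
      = ([] : List (List String)) ++ (List.replicate n (List.replicate (3*n) ".")
        ++ (List.replicate n (List.replicate (3*n) ".") ++ (List.replicate n (List.replicate (3*n) ".") ++ []))) := by
    rw [List.nil_append, List.append_nil, ← List.replicate_add, ← List.replicate_add]
    congr 1
    omega
  rw [hsplit, blockfill (fillRow (3*n)) (fun i => i) n _ _ _ (by simp)]
  have hfull : fillRow (3*n) (List.replicate (3*n) ".") = List.replicate (3*n) "#" := by
    rw [fillRow_eq _ _ (by simp)]; simp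
  rw [hfull]
  -- stage 2
  have s2 : ∀ g : List (List String),
      (PySem.List.pyRange 0 (n : Int) 1).foldl (fun g i =>
        (PySem.List.pyRange 0 (n:Int) 1).foldl (fun g j =>
          PySem.List.pySetD g ((n:Int)+i) (PySem.List.pySetD (PySem.List.pyGetD g ((n:Int)+i) []) j "#")) g) g
      = (PySem.List.pyRange 0 (n : Int) 1).foldl (fun g i =>
          PySem.List.pySetD g ((n:Int)+i) (fillRow n (PySem.List.pyGetD g ((n:Int)+i) []))) g := by
    intro g
    apply PySem.List.foldl_congr_mem
    intro acc x hx
    have hx0 : 0 ≤ x := (PySem.List.mem_pyRange_one.mp hx).1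
    exact inner_fold _ _ _ (by positivity)
  simp only [List.nil_append]
  rw [s2, blockfill (fillRow n) (fun i => (n:Int)+i) n _ _ _ (by simp)]
  have hmid : fillRow n (List.replicate (3*n) ".") = List.replicate n "#" ++ List.replicate (2*n) "." := by
    rw [fillRow_eq _ _ (by simp; omega), List.drop_replicate]
    congr 2
    omega
  rw [hmid]
  -- stage 3
  have s3 : ∀ g : List (List String),
      (PySem.List.pyRange 0 (n : Int) 1).foldl (fun g i =>
        (PySem.List.pyRange 0 ((n:Int)*3) 1).foldl (fun g j =>
          PySem.List.pySetD g ((n:Int)*2+i) (PySem.List.pySetD (PySem.List.pyGetD g ((n:Int)*2+i) []) j "#")) g) g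
      = (PySem.List.pyRange 0 (n : Int) 1).foldl (fun g i =>
          PySem.List.pySetD g ((n:Int)*2+i) (fillRow (3*n) (PySem.List.pyGetD g ((n:Int)*2+i) []))) g := by
    intro g
    apply PySem.List.foldl_congr_mem
    intro acc x hx
    have hx0 : 0 ≤ x := (PySem.List.mem_pyRange_one.mp hx).1
    rw [h3, inner_fold _ _ _ (by positivity)]
  rw [s3]
  have hassoc : List.replicate n (List.replicate (3*n) "#")
      ++ (List.replicate n (List.replicate n "#" ++ List.replicate (2*n) ".")
        ++ (List.replicate n (List.replicate (3*n) ".") ++ []))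
      = (List.replicate n (List.replicate (3*n) "#")
        ++ List.replicate n (List.replicate n "#" ++ List.replicate (2*n) "."))
        ++ (List.replicate n (List.replicate (3*n) ".") ++ []) := by
    simp
  rw [hassoc, blockfill (fillRow (3*n)) (fun i => (n:Int)*2+i) n _ _ _ (by simp; ring)]
  rw [hfull]
  simp

-- B's value for k = n ≥ 0, same closed form
theorem makeDigut_alt_nat (n : Nat) :
    makeDigut_alt (n : Int) =
      List.replicate n (List.replicate (3*n) "#")
      ++ (List.replicate n (List.replicate n "#" ++ List.replicate (2*n) ".")
      ++ List.replicate n (List.replicate (3*n) "#")) := by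
  unfold makeDigut_alt
  rw [PySem.List.foldl_append_singleton_eq_map]
  rw [PySem.List.pyRange_one_append 0 (n : Int) ((n:Int)*3) (by positivity) (by nlinarith [Int.natCast_nonneg n]),
      PySem.List.pyRange_one_append (n:Int) ((n:Int)*2) ((n:Int)*3) (by nlinarith [Int.natCast_nonneg n]) (by nlinarith [Int.natCast_nonneg n])]
  simp only [List.map_append, List.nil_append]
  congr 1
  · rw [List.map_congr_left (g := fun _ => List.replicate (3*n) "#") ?_, List.map_const']
    · rw [PySem.List.length_pyRange_one, show ((n:Int) - 0).toNat = n by omega]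
    · intro x hx
      obtain ⟨h1, h2⟩ := PySem.List.mem_pyRange_one.mp hx
      rw [if_pos (by simp only [Bool.or_eq_true, decide_eq_true_eq]; omega)]
      rw [PySem.List.pyRepeat_singleton, show ((n:Int)*3).toNat = 3*n by omega]
  congr 1
  · rw [List.map_congr_left (g := fun _ => List.replicate n "#" ++ List.replicate (2*n) ".") ?_, List.map_const']
    · rw [PySem.List.length_pyRange_one, show ((n:Int)*2 - (n:Int)).toNat = n by omega]
    · intro x hx
      obtain ⟨h1, h2⟩ := PySem.List.mem_pyRange_one.mp hx
      rw [if_neg (by simp only [Bool.or_eq_true, decide_eq_true_eq]; omega)]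
      rw [PySem.List.pyRepeat_singleton, PySem.List.pyRepeat_singleton,
          show ((n:Int)).toNat = n by omega, show ((n:Int)*2).toNat = 2*n by omega]
  · rw [List.map_congr_left (g := fun _ => List.replicate (3*n) "#") ?_, List.map_const']
    · rw [PySem.List.length_pyRange_one, show ((n:Int)*3 - (n:Int)*2).toNat = n by omega]
    · intro x hx
      obtain ⟨h1, h2⟩ := PySem.List.mem_pyRange_one.mp hx
      rw [if_pos (by simp only [Bool.or_eq_true, decide_eq_true_eq]; omega)]
      rw [PySem.List.pyRepeat_singleton, show ((n:Int)*3).toNat = 3*n by omega]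

-- ===== VERDICT (by name: the statement is the Claim_ definition above) =====
theorem makeDigut_spec : Claim_equal_makeDigut := by
  intro k _
  unfold Spec_makeDigut
  by_cases hk : k ≤ 0
  · unfold makeDigut makeDigut_alt
    rw [PySem.List.pyRange_one_eq_nil (by linarith), PySem.List.pyRange_one_eq_nil (by linarith)]
    simp
  · obtain ⟨n, rfl⟩ : ∃ n : Nat, k = (n : Int) := ⟨k.toNat, (Int.toNat_of_nonneg (by omega)).symm⟩
    rw [makeDigut_nat, makeDigut_alt_nat]
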